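-- pv_equiv track=rewrite | github.com/JianerCong/work | lcode/m.py | make_sets
-- ===== SOURCE A (Python) =====
-- from typing import Dict, List
--
-- def make_sets(nums: List[int]):
--     s = set()
--     s2 = set()
--     n0 = 0                  # number of 0
--     for n in nums:
--         if n == 0:
--             n0 += 1
--         if n in s and n != 0:  # 0 shouldn't be in s2
--             s2.add(n)
--         else:
--             s.add(n)
--     return n0,s,s2
-- ===== SOURCE B (Python) =====
-- from typing import Dict, List
--
-- def make_sets(nums: List[int]):
--     # Index pass: first occurrence position of each value, then count/filter.
--     first = {}
--     for i, n in enumerate(nums):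
--         first.setdefault(n, i)
--     n0 = nums.count(0)
--     s2 = {n for i, n in enumerate(nums) if n != 0 and first[n] != i}
--     return n0, set(first), s2
-- ===== Notes on version B (the rewrite author's own statement) =====
-- stated objective: alternative
-- what changed: Replaces A's single streaming pass with membership-driven two-set bookkeeping by an index-then-filter design: build a first-occurrence index map once, get the zero count from list.count, the unique set from the map's keys, and the duplicate set with a comprehension keeping elements whose position is not their first occurrence.
import Mathlib
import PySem

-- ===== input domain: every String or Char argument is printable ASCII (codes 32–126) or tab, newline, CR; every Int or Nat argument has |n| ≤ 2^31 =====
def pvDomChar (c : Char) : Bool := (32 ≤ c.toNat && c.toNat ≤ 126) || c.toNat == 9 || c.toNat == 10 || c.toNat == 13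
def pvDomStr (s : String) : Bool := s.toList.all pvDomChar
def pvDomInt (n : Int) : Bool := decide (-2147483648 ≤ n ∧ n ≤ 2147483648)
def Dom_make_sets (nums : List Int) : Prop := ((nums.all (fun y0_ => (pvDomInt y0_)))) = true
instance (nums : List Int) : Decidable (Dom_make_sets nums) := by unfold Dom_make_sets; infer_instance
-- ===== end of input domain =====

-- B replaces A's streaming pass with its two-set membership bookkeeping by an index-then-filter
-- design (first-occurrence index map + list.count + one duplicate-selecting comprehension);
-- objective: alternative structure, no speed claim. The two Python set results are represented
-- as their first-insertion-order element lists.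

-- ===== PORT A =====
-- one loop step of A: n0 bump, then the membership-driven branch over the two sets
def stepA (st : Int × PySem.Set Int × PySem.Set Int) (n : Int) : Int × PySem.Set Int × PySem.Set Int :=
  let n0 := if n == 0 then st.1 + 1 else st.1
  if st.2.1.contains n && !(n == 0) then (n0, st.2.1, st.2.2.add n)
  else (n0, PySem.Set.add st.2.1 n, st.2.2)

def make_sets (nums : List Int) : Int × List Int × List Int :=
  nums.foldl stepA (0, PySem.Set.empty, PySem.Set.empty)

-- ===== PORT B =====
-- first = {}; for i, n in enumerate(nums): first.setdefault(n, i)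
def firstIdx (nums : List Int) : PySem.Dict Int Int :=
  (PySem.List.enumerate nums).foldl (fun d p => d.setdefault p.2 p.1) PySem.Dict.empty

def make_sets_alt (nums : List Int) : Int × List Int × List Int :=
  let first := firstIdx nums
  let n0 : Int := (PySem.List.count nums 0 : Int)
  -- first[n]: n is always a key of first, so getD's default is never consulted
  let s2 := PySem.Set.ofList
    (((PySem.List.enumerate nums).filter
        (fun p => !(p.2 == 0) && !(first.getD p.2 p.1 == p.1))).map (fun p => p.2))
  (n0, PySem.Set.ofList first.keys, s2)

-- ===== PRECONDITION & SPEC =====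
def Spec_make_sets (nums : List Int) (out : Int × List Int × List Int) : Prop := out = make_sets_alt nums
instance (nums : List Int) (out : Int × List Int × List Int) : Decidable (Spec_make_sets nums out) := by unfold Spec_make_sets; infer_instance

-- ===== CLAIM (what is proved, stated in full; the proofs are below) =====
def Claim_equal_make_sets : Prop := ∀ (nums : List Int), Dom_make_sets nums → Spec_make_sets nums (make_sets nums)

-- ===== LEMMAS AND PROOFS =====

theorem keys_setdefault_add (d : PySem.Dict Int Int) (k v : Int) :
    (d.setdefault k v).keys = PySem.Set.add d.keys k := by
  rw [PySem.Dict.keys_setdefault, PySem.Set.add_eq_ite]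
  by_cases h : k ∈ d.keys
  · simp [h, (PySem.Dict.contains_iff_mem_keys d k).mpr h]
  · have hc : d.contains k = false := by
      cases hcc : d.contains k
      · rfl
      · exact absurd ((PySem.Dict.contains_iff_mem_keys d k).mp hcc) h
    simp [h, hc]

theorem keys_foldl_setdefault (ps : List (Int × Int)) (d : PySem.Dict Int Int) :
    (ps.foldl (fun d p => d.setdefault p.2 p.1) d).keys
      = PySem.Set.update d.keys (ps.map (fun p => p.2)) := by
  induction ps generalizing d with
  | nil => simp [PySem.Set.update]
  | cons p t ih =>
      simp only [List.foldl_cons, List.map_cons, PySem.Set.update_cons, ih, keys_setdefault_add]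

theorem get?_foldl_setdefault (ps : List (Int × Int)) (d : PySem.Dict Int Int) (n : Int) :
    (ps.foldl (fun d p => d.setdefault p.2 p.1) d).get? n
      = (d.get? n).or ((ps.find? (fun p => p.2 == n)).map (fun p => p.1)) := by
  induction ps generalizing d with
  | nil => simp
  | cons p t ih =>
      obtain ⟨v, k⟩ := p
      simp only [List.foldl_cons]
      rw [ih]
      by_cases hn : k = n
      · subst hn
        rw [PySem.Dict.get?_setdefault_self, List.find?_cons_of_pos (by simp)]
        cases hd : d.get? k <;> simp
      · rw [PySem.Dict.get?_setdefault_of_ne d v (fun e => hn e.symm),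
           List.find?_cons_of_neg (by simp [hn])]

theorem find?_enumerate_of_not_mem (l : List Int) (s n : Int) (h : n ∉ l) :
    (PySem.List.enumerate l s).find? (fun p => p.2 == n) = none := by
  induction l generalizing s with
  | nil => simp [PySem.List.enumerate]
  | cons x t ih =>
      rw [PySem.List.enumerate_cons,
        List.find?_cons_of_neg (by simp; exact fun e => h (by simp [e]))]
      exact ih (s + 1) (fun hm => h (List.mem_cons_of_mem _ hm))

theorem find?_enumerate_of_mem (l : List Int) (s n : Int) (h : n ∈ l) :
    ∃ j : Int, (PySem.List.enumerate l s).find? (fun p => p.2 == n) = some (j, n)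
      ∧ s ≤ j ∧ j < s + l.length := by
  induction l generalizing s with
  | nil => simp at h
  | cons x t ih =>
      rw [PySem.List.enumerate_cons]
      by_cases hx : x = n
      · subst hx
        refine ⟨s, ?_, le_refl s, ?_⟩
        · rw [List.find?_cons_of_pos (by simp)]
        · simp only [List.length_cons]; push_cast; omega
      · have hm : n ∈ t := by
          rcases List.mem_cons.mp h with h1 | h1
          · exact absurd h1.symm hx
          · exact h1
        obtain ⟨j, hj, h1, h2⟩ := ih (s + 1) hm
        refine ⟨j, ?_, by omega, ?_⟩
        · rw [List.find?_cons_of_neg (by simp [hx]), hj]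
        · simp only [List.length_cons]; push_cast; omega

theorem enumerate_append (a b : List Int) (s : Int) :
    PySem.List.enumerate (a ++ b) s
      = PySem.List.enumerate a s ++ PySem.List.enumerate b (s + a.length) := by
  induction a generalizing s with
  | nil => simp [PySem.List.enumerate]
  | cons x t ih =>
      rw [List.cons_append, PySem.List.enumerate_cons, PySem.List.enumerate_cons, ih]
      simp only [List.length_cons, List.cons_append, List.cons.injEq, true_and]
      congr 2
      push_cast
      ring

theorem cond_firstIdx (pre t : List Int) (n : Int) :
    ((firstIdx (pre ++ n :: t)).getD n (pre.length : Int) == (pre.length : Int))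
      = decide (n ∉ pre) := by
  rw [PySem.Dict.getD_eq_get?_getD, firstIdx, get?_foldl_setdefault, enumerate_append,
    List.find?_append]
  simp only [PySem.Dict.get?_empty, Option.none_or, zero_add]
  by_cases hmem : n ∈ pre
  · obtain ⟨j, hj, h0, hlt⟩ := find?_enumerate_of_mem pre 0 n hmem
    rw [hj]
    simp only [Option.some_or, Option.map_some, Option.getD_some]
    simp [hmem, show j ≠ (pre.length : Int) by omega]
  · rw [find?_enumerate_of_not_mem pre 0 n hmem, PySem.List.enumerate_cons,
      List.find?_cons_of_pos (by simp)]
    simp [hmem]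

theorem foldl_stepA (l : List Int) : ∀ (pre : List Int) (n0 : Int) (s2 : PySem.Set Int),
    l.foldl stepA (n0, PySem.Set.ofList pre, s2)
      = (n0 + (l.count 0 : Int),
         PySem.Set.ofList (pre ++ l),
         PySem.Set.update s2 (((PySem.List.enumerate l (pre.length : Int)).filter
            (fun p => !(p.2 == 0) && !((firstIdx (pre ++ l)).getD p.2 p.1 == p.1))).map (fun p => p.2))) := by
  induction l with
  | nil => intro pre n0 s2; simp [PySem.List.enumerate, PySem.Set.update]
  | cons n t ih =>
      intro pre n0 s2
      have hcond := cond_firstIdx pre t n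
      rw [List.foldl_cons]
      by_cases hz : n = 0
      · -- n = 0: always the else branch, n0 bumped, filter drops the head
        subst hz
        have hstep : stepA (n0, PySem.Set.ofList pre, s2) 0
            = (n0 + 1, PySem.Set.add (PySem.Set.ofList pre) 0, s2) := by
          simp [stepA]
        rw [hstep, ← PySem.Set.ofList_append_singleton, ih (pre ++ [0]) (n0 + 1) s2]
        rw [PySem.List.enumerate_cons, List.filter_cons_of_neg (by simp)]
        simp only [List.append_assoc, List.singleton_append, List.length_append,
          List.length_cons, List.length_nil, List.count_cons, Prod.mk.injEq]
        push_cast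
        refine ⟨?_, trivial, rfl⟩
        simp
        omega
      · by_cases hmem : n ∈ pre
        · -- member, nonzero: A takes the then branch, the comprehension keeps the head
          have hstep : stepA (n0, PySem.Set.ofList pre, s2) n
              = (n0, PySem.Set.ofList pre, s2.add n) := by
            simp [stepA, hmem, hz]
          have hS : PySem.Set.ofList pre = PySem.Set.ofList (pre ++ [n]) := by
            rw [PySem.Set.ofList_append_singleton,
              PySem.Set.add_of_mem ((PySem.Set.mem_ofList pre n).mpr hmem)]
          rw [hstep, hS, ih (pre ++ [n]) n0 (s2.add n)]
          rw [PySem.List.enumerate_cons,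
            List.filter_cons_of_pos (by simp [hcond, hmem]; exact hz),
            List.map_cons, PySem.Set.update_cons]
          simp only [List.append_assoc, List.singleton_append, List.length_append,
            List.length_cons, List.length_nil, List.count_cons, Prod.mk.injEq]
          push_cast
          refine ⟨?_, trivial, rfl⟩
          simp
          omega
        · -- fresh, nonzero: else branch, filter drops the head (first occurrence)
          have hstep : stepA (n0, PySem.Set.ofList pre, s2) n
              = (n0, PySem.Set.add (PySem.Set.ofList pre) n, s2) := by
            simp [stepA, hmem, hz]
          rw [hstep, ← PySem.Set.ofList_append_singleton, ih (pre ++ [n]) n0 s2]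
          rw [PySem.List.enumerate_cons, List.filter_cons_of_neg (by simp [hcond, hmem])]
          simp only [List.append_assoc, List.singleton_append, List.length_append,
            List.length_cons, List.length_nil, List.count_cons, Prod.mk.injEq]
          push_cast
          refine ⟨?_, trivial, rfl⟩
          simp
          omega

theorem make_sets_eq_alt (nums : List Int) : make_sets nums = make_sets_alt nums := by
  have h := foldl_stepA nums [] 0 PySem.Set.empty
  simp only [List.nil_append, List.length_nil, Nat.cast_zero, zero_add,
    show PySem.Set.ofList ([] : List Int) = PySem.Set.empty from rfl] at h
  rw [make_sets, h, make_sets_alt]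
  have hkeys : (firstIdx nums).keys = PySem.Set.ofList nums := by
    rw [firstIdx, keys_foldl_setdefault]
    simp [PySem.List.map_snd_enumerate, PySem.Set.update_nil_left, PySem.Dict.keys,
      PySem.Dict.empty]
  rw [hkeys, PySem.Set.ofList_ofList]
  simp [PySem.List.count, PySem.Set.update_nil_left, PySem.Set.empty]

-- ===== VERDICT (by name: the statement is the Claim_ definition above) =====
theorem make_sets_spec : Claim_equal_make_sets := by
  intro nums _
  exact make_sets_eq_alt nums
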